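-- pv_equiv track=rewrite | github.com/29rithm/algospot | FENCE/fence_jimin.py | get_max_square_measure
-- ===== SOURCE A (Python) =====
-- def get_max_square_measure(fence):
--     max_square_measure = 0
--     width = len(fence)
--
--     for i in range(width):
--         height = fence[i]
--
--         max_vertical_rectangle_height = height
--         max_vertical_rectangle_width = 1
--         max_horizontal_rectangle_height = height
--         max_horizontal_rectangle_width = 1
--
--         for j in range(i + 1, width):
--             next_height = fence[j]
--             if height <= next_height:
--                 max_vertical_rectangle_width += 1
--             else:
--                 break
--
--         for j in range(i + 1, width):
--             next_height = fence[j]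
--             if max_horizontal_rectangle_height > next_height:
--                 max_horizontal_rectangle_height = next_height
--             else:
--                 break
--             max_horizontal_rectangle_width += 1
--
--         verical_squared_measure = (
--             max_vertical_rectangle_height * max_vertical_rectangle_width
--         )
--         horizontal_squared_measure = (
--             max_horizontal_rectangle_height * max_horizontal_rectangle_width
--         )
--
--         if verical_squared_measure > max_square_measure:
--             max_square_measure = verical_squared_measure
--
--         if horizontal_squared_measure > max_square_measure:
--             max_square_measure = horizontal_squared_measure
--
--     return max_square_measure
-- ===== SOURCE B (Python) =====
-- def get_max_square_measure(fence):
--     # One backward O(n) pass: a monotonic stack of (height, width) blocks gives the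
--     # right-extension width for each bar, and a running (length, last) pair gives the
--     # strictly-decreasing run; A recomputes both with inner scans (O(n^2)).
--     best = 0
--     stack = []  # blocks (h, w): w consecutive elements to the right, all >= h, starting with h
--     dec_len = 0
--     dec_last = 0
--     prev = None
--     for x in reversed(fence):
--         total = 1
--         while stack and stack[-1][0] >= x:
--             total += stack.pop()[1]
--         stack.append((x, total))
--         if prev is not None and prev < x:
--             dec_len += 1
--         else:
--             dec_len = 1
--             dec_last = x
--         v = x * total
--         h = dec_last * dec_len
--         best = max(best, v, h)
--         prev = x
--     return best
-- ===== Notes on version B (the rewrite author's own statement) =====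
-- stated objective: faster
-- what changed: A rescans the suffix after every index twice (right-extension count and decreasing-run walk), O(n^2); B makes a single backward pass keeping a monotonic stack of (height,width) blocks to get each bar's right-extension width and a running (length,last) pair for the strictly decreasing run, O(n).
import Mathlib
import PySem

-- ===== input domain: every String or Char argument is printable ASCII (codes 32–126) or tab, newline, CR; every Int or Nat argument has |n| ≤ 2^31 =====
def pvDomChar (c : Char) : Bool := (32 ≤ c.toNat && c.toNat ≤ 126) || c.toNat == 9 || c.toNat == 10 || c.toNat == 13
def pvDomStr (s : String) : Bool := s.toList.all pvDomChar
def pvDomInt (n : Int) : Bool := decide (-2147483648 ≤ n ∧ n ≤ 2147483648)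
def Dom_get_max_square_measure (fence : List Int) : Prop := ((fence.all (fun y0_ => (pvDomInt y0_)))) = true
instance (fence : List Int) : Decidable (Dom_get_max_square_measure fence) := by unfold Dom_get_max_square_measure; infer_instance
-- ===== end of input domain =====

-- B replaces A's two inner scans per index by one backward O(n) pass (monotonic stack
-- of (height,width) blocks for the right-extension width; a running (length,last) pair
-- for the strictly decreasing run); objective: faster (O(n^2) → O(n)).

-- ===== PORT A =====
-- inner loop 1: count consecutive following bars with height <= next (break otherwise)
def vCountA (x : Int) : List Int → Int
  | [] => 0
  | y :: t => if x ≤ y then 1 + vCountA x t else 0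

-- inner loop 2: walk the strictly decreasing run, tracking current min height and width
def hLoopA (cur w : Int) : List Int → Int × Int
  | [] => (cur, w)
  | y :: t => if y < cur then hLoopA y (w + 1) t else (cur, w)

-- outer loop over i (each i sees the suffix after it), accumulator = max_square_measure
def aGo (m : Int) : List Int → Int
  | [] => m
  | x :: t =>
    let v := x * (1 + vCountA x t)
    let hp := hLoopA x 1 t
    let h := hp.1 * hp.2
    let m1 := if m < v then v else m
    let m2 := if m1 < h then h else m1
    aGo m2 t

def get_max_square_measure (fence : List Int) : Int := aGo 0 fence

-- ===== PORT B =====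
-- pop all blocks whose head height is >= x, returning (sum of popped widths, rest)
def popB (x : Int) : List (Int × Int) → Int × List (Int × Int)
  | [] => (0, [])
  | (h, w) :: st => if x ≤ h then ((popB x st).1 + w, (popB x st).2) else (0, (h, w) :: st)

-- backward pass; state = (best, stack, dec_len, dec_last); prev = head of the suffix t
def bGo : List Int → Int × List (Int × Int) × Int × Int
  | [] => (0, [], 0, 0)
  | x :: t =>
    let r := bGo t
    let p := popB x r.2.1
    let tot := 1 + p.1
    let dd : Int × Int := match t with
      | [] => (1, x)
      | y :: _ => if y < x then (r.2.2.1 + 1, r.2.2.2) else (1, x)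
    (max (max r.1 (x * tot)) (dd.2 * dd.1), (x, tot) :: p.2, dd.1, dd.2)

def get_max_square_measure_alt (fence : List Int) : Int := (bGo fence).1

-- ===== PRECONDITION & SPEC =====
def Spec_get_max_square_measure (fence : List Int) (out : Int) : Prop := out = get_max_square_measure_alt fence
instance (fence : List Int) (out : Int) : Decidable (Spec_get_max_square_measure fence out) := by unfold Spec_get_max_square_measure; infer_instance

-- ===== CLAIM (what is proved, stated in full; the proofs are below) =====
def Claim_equal_get_max_square_measure : Prop := ∀ (fence : List Int), Dom_get_max_square_measure fence → Spec_get_max_square_measure fence (get_max_square_measure fence)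

-- ===== LEMMAS AND PROOFS =====

-- the two candidate areas contributed by each position, in A's order
def areas : List Int → List Int
  | [] => []
  | x :: t => x * (1 + vCountA x t) :: (hLoopA x 1 t).1 * (hLoopA x 1 t).2 :: areas t

theorem aGo_eq_foldl : ∀ (s : List Int) (m : Int), aGo m s = List.foldl max m (areas s) := by
  intro s
  induction s with
  | nil => intro m; simp [aGo, areas]
  | cons x t ih =>
    intro m
    simp only [aGo, areas, List.foldl_cons]
    rw [ih]
    congr 1
    omega

theorem foldl_max_pull : ∀ (L : List Int) (a b : Int),
    List.foldl max (max a b) L = max a (List.foldl max b L) := by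
  intro L
  induction L with
  | nil => intro a b; simp
  | cons c L ih =>
    intro a b
    simp only [List.foldl_cons]
    rw [max_assoc, ih]

theorem fold_two (L : List Int) (av ah : Int) :
    List.foldl max (max (max 0 av) ah) L = max (max (List.foldl max 0 L) av) ah := by
  rw [show max (max 0 av) ah = max (max av ah) 0 by omega, foldl_max_pull]
  omega

-- stack invariant: the stack partitions the suffix into blocks, each block's elements ≥ its head
inductive StRep : List (Int × Int) → List Int → Prop
  | nil : StRep [] []
  | cons {h w : Int} {blk : List Int} {st : List (Int × Int)} {s : List Int} :
      blk.head? = some h → (blk.length : Int) = w → (∀ y ∈ blk, h ≤ y) →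
      StRep st s → StRep ((h, w) :: st) (blk ++ s)

theorem vCountA_append_all {x : Int} : ∀ (blk s : List Int), (∀ y ∈ blk, x ≤ y) →
    vCountA x (blk ++ s) = (blk.length : Int) + vCountA x s := by
  intro blk
  induction blk with
  | nil => intro s _; simp
  | cons y t ih =>
    intro s hall
    have hy : x ≤ y := hall y (by simp)
    simp only [List.cons_append, vCountA, if_pos hy, List.length_cons]
    rw [ih s (fun z hz => hall z (by simp [hz]))]
    push_cast; ring

theorem popB_spec : ∀ {st : List (Int × Int)} {s : List Int}, StRep st s → ∀ (x : Int),
    (popB x st).1 = vCountA x s ∧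
    ∃ pre post, s = pre ++ post ∧ ((pre.length : Int)) = (popB x st).1 ∧
      (∀ y ∈ pre, x ≤ y) ∧ StRep (popB x st).2 post := by
  intro st s hrep
  induction hrep with
  | nil =>
    intro x
    exact ⟨by simp [popB, vCountA], [], [], by simp, by simp [popB], by simp, by
      simpa [popB] using StRep.nil⟩
  | cons hh hlen hall hrep ih =>
    rename_i h w blk st s
    intro x
    by_cases hx : x ≤ h
    · obtain ⟨h1, pre, post, hs, hl, hp, hr⟩ := ih x
      have hallx : ∀ y ∈ blk, x ≤ y := fun y hy => le_trans hx (hall y hy)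
      constructor
      · simp only [popB, if_pos hx]
        rw [vCountA_append_all blk s hallx, h1]; omega
      · refine ⟨blk ++ pre, post, by rw [hs, List.append_assoc], ?_, ?_, ?_⟩
        · simp only [popB, if_pos hx, List.length_append]
          push_cast; omega
        · intro y hy
          rcases List.mem_append.1 hy with hy | hy
          · exact hallx y hy
          · exact hp y hy
        · simpa [popB, if_pos hx] using hr
    · obtain ⟨rest, rfl⟩ : ∃ rest, blk = h :: rest := by
        cases blk with
        | nil => simp at hh
        | cons a r => exact ⟨r, by rw [show a = h by simpa using hh]⟩
      constructor
      · simp only [popB, List.cons_append, vCountA, if_neg hx]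
      · exact ⟨[], (h :: rest) ++ s, by simp, by simp [popB, if_neg hx], by simp, by
          simpa [popB, if_neg hx] using StRep.cons hh hlen hall hrep⟩

theorem hLoopA_fst : ∀ (s : List Int) (c w w' : Int),
    (hLoopA c w s).1 = (hLoopA c w' s).1 := by
  intro s
  induction s with
  | nil => intro c w w'; rfl
  | cons y t ih =>
    intro c w w'
    by_cases hy : y < c
    · simp only [hLoopA, if_pos hy]; exact ih y (w + 1) (w' + 1)
    · simp only [hLoopA, if_neg hy]

theorem hLoopA_snd : ∀ (s : List Int) (c w : Int),
    (hLoopA c w s).2 = (hLoopA c 1 s).2 + (w - 1) := by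
  intro s
  induction s with
  | nil => intro c w; simp only [hLoopA]; omega
  | cons y t ih =>
    intro c w
    by_cases hy : y < c
    · simp only [hLoopA, if_pos hy]
      rw [ih y (w + 1), ih y (1 + 1)]; omega
    · simp only [hLoopA, if_neg hy]; omega

-- definitional component equations for bGo on a cons
theorem bGo_fst (x : Int) (t : List Int) :
    (bGo (x :: t)).1 = max (max ((bGo t).1) (x * (1 + (popB x ((bGo t).2.1)).1)))
      ((bGo (x :: t)).2.2.2 * (bGo (x :: t)).2.2.1) := rfl

theorem bGo_stack (x : Int) (t : List Int) :
    (bGo (x :: t)).2.1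
      = (x, 1 + (popB x ((bGo t).2.1)).1) :: (popB x ((bGo t).2.1)).2 := rfl

theorem bGo_dec_nil (x : Int) : (bGo [x]).2.2 = (1, x) := rfl

theorem bGo_dec_cons (x y : Int) (u : List Int) :
    (bGo (x :: y :: u)).2.2
      = if y < x then ((bGo (y :: u)).2.2.1 + 1, (bGo (y :: u)).2.2.2) else (1, x) := rfl

theorem bGo_inv : ∀ (s : List Int),
    StRep (bGo s).2.1 s ∧ (bGo s).1 = List.foldl max 0 (areas s) ∧
    (∀ x t, s = x :: t → ((bGo s).2.2.2, (bGo s).2.2.1) = hLoopA x 1 t) := by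
  intro s
  induction s with
  | nil =>
    refine ⟨by simpa [bGo] using StRep.nil, by simp [bGo, areas], ?_⟩
    intro x t h; cases h
  | cons x t ih =>
    obtain ⟨hrep, hbest, hdec⟩ := ih
    obtain ⟨hcnt, pre, post, hs, hl, hp, hr⟩ := popB_spec hrep x
    have hstack : StRep ((bGo (x :: t)).2.1) (x :: t) := by
      rw [bGo_stack]
      have hxt : x :: t = (x :: pre) ++ post := by rw [hs]; rfl
      rw [hxt]
      refine StRep.cons (by simp) ?_ ?_ hr
      · simp only [List.length_cons]; push_cast; omega
      · intro y hy
        rcases List.mem_cons.1 hy with rfl | hy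
        · exact le_refl y
        · exact hp y hy
    have hdd : ((bGo (x :: t)).2.2.2, (bGo (x :: t)).2.2.1) = hLoopA x 1 t := by
      cases t with
      | nil => rw [bGo_dec_nil]; rfl
      | cons y u =>
        have hIH := hdec y u rfl
        have h1 : (bGo (y :: u)).2.2.2 = (hLoopA y 1 u).1 := congrArg Prod.fst hIH
        have h2 : (bGo (y :: u)).2.2.1 = (hLoopA y 1 u).2 := congrArg Prod.snd hIH
        by_cases hy : y < x
        · rw [bGo_dec_cons, if_pos hy]
          simp only [hLoopA, if_pos hy]
          refine Prod.ext ?_ ?_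
          · rw [h1]; exact hLoopA_fst u y 1 (1 + 1)
          · rw [h2, hLoopA_snd u y (1 + 1)]; omega
        · rw [bGo_dec_cons, if_neg hy]
          simp [hLoopA, if_neg hy]
    refine ⟨hstack, ?_, by intro x' t' h; cases h; exact hdd⟩
    have hA : (bGo (x :: t)).2.2.2 = (hLoopA x 1 t).1 := congrArg Prod.fst hdd
    have hB : (bGo (x :: t)).2.2.1 = (hLoopA x 1 t).2 := congrArg Prod.snd hdd
    rw [bGo_fst, hA, hB, hcnt, hbest]
    simp only [areas, List.foldl_cons]
    rw [fold_two]

-- ===== VERDICT (by name: the statement is the Claim_ definition above) =====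
theorem get_max_square_measure_spec : Claim_equal_get_max_square_measure := by
  intro fence _
  unfold Spec_get_max_square_measure get_max_square_measure get_max_square_measure_alt
  exact (aGo_eq_foldl fence 0).trans ((bGo_inv fence).2.1).symm
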